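-- pv_equiv track=rewrite | github.com/Pritish0173/Competitive-Programming | 09-hasconsecutivedigits-Python/hasconsecutivedigits.py | hasconsecutivedigits
-- ===== SOURCE A (Python) =====
-- def hasconsecutivedigits(n):
-- 	# your code goes here
-- 	s = str(abs(n))
-- 	temp = ""
-- 	for i in s:
-- 		if i == temp:
-- 			return True
-- 		temp = i
-- 	return False
-- ===== SOURCE B (Python) =====
-- def hasconsecutivedigits(n):
--     m = abs(n)
--     prev = m % 10
--     m //= 10
--     while m:
--         d = m % 10
--         if d == prev:
--             return True
--         prev = d
--         m //= 10
--     return False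
-- ===== Notes on version B (the rewrite author's own statement) =====
-- stated objective: alternative
-- what changed: B extracts digits arithmetically (m % 10, m //= 10) from least- to most-significant with a while loop, never building the decimal string that A iterates over.
import Mathlib
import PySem

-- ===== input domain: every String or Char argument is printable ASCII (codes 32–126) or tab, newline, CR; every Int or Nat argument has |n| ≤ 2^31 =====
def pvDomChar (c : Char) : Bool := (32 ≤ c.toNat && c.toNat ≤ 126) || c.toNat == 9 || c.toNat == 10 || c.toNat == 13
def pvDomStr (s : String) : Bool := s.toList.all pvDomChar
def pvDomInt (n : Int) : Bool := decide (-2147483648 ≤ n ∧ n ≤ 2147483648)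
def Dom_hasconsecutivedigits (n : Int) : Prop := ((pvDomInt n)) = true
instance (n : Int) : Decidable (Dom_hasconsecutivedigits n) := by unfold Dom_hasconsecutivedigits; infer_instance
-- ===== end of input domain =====

-- B replaces A's string conversion with arithmetic digit extraction (m % 10, m //= 10),
-- traversing digits least- to most-significant; alternative decomposition, same cost.


-- ===== PORT A =====
-- A iterates over the characters of str(abs(n)), keeping the previous character in
-- `temp` (a string, initially ""); `i == temp` is a string comparison.
def pvALoop : List Char → List Char → Bool
  | [], _ => false
  | c :: rest, temp => if [c] = temp then true else pvALoop rest [c]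

def hasconsecutivedigits (n : Int) : Bool :=
  pvALoop (PySem.Int.toChars ((n.natAbs : Nat) : Int)) []

-- ===== PORT B =====
-- while m: d = m % 10; if d == prev: return True; prev = d; m //= 10   (m = abs(n) // 10)
def pvBLoop (prev : Nat) (m : Nat) : Bool :=
  if h : m = 0 then false
  else if m % 10 = prev then true
  else pvBLoop (m % 10) (m / 10)
decreasing_by exact Nat.div_lt_self (Nat.pos_of_ne_zero h) (by norm_num)

def hasconsecutivedigits_alt (n : Int) : Bool :=
  let m : Nat := n.natAbs
  pvBLoop (m % 10) (m / 10)

-- ===== PRECONDITION & SPEC =====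
def Spec_hasconsecutivedigits (n : Int) (out : Bool) : Prop := out = hasconsecutivedigits_alt n
instance (n : Int) (out : Bool) : Decidable (Spec_hasconsecutivedigits n out) := by unfold Spec_hasconsecutivedigits; infer_instance

-- ===== CLAIM (what is proved, stated in full; the proofs are below) =====
def Claim_equal_hasconsecutivedigits : Prop := ∀ (n : Int), Dom_hasconsecutivedigits n → Spec_hasconsecutivedigits n (hasconsecutivedigits n)

-- ===== LEMMAS AND PROOFS =====

-- "some adjacent pair in prev :: l is equal"
def pvAdjChain {α : Type} [DecidableEq α] (prev : α) : List α → Bool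
  | [] => false
  | x :: xs => (decide (x = prev)) || pvAdjChain x xs

def pvAdjAny {α : Type} [DecidableEq α] : List α → Bool
  | [] => false
  | x :: xs => pvAdjChain x xs

lemma pvALoop_eq_chain (cs : List Char) (t : Char) : pvALoop cs [t] = pvAdjChain t cs := by
  induction cs generalizing t with
  | nil => rfl
  | cons c rest ih =>
    by_cases h : c = t <;> simp [pvALoop, pvAdjChain, ih, Bool.or_comm, h]

lemma pvALoop_eq_adjAny (cs : List Char) : pvALoop cs [] = pvAdjAny cs := by
  cases cs with
  | nil => rfl
  | cons c rest => simp [pvALoop, pvAdjAny, pvALoop_eq_chain]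

lemma pvBLoop_eq_chain (m prev : Nat) : pvBLoop prev m = pvAdjChain prev (Nat.digits 10 m) := by
  induction m using Nat.strong_induction_on generalizing prev with
  | _ m ih =>
    by_cases h : m = 0
    · subst h; simp [pvBLoop, pvAdjChain]
    · rw [pvBLoop, Nat.digits_def' (by norm_num) (Nat.pos_of_ne_zero h)]
      simp only [h, dite_false, pvAdjChain]
      by_cases he : m % 10 = prev
      · simp [he]
      · simp [he, ih (m / 10) (Nat.div_lt_self (Nat.pos_of_ne_zero h) (by norm_num))]

lemma pvAdjChain_not_chain {α : Type} [DecidableEq α] (t : α) (l : List α) :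
    pvAdjChain t l = !decide (List.IsChain (· ≠ ·) (t :: l)) := by
  induction l generalizing t with
  | nil => simp [pvAdjChain]
  | cons x xs ih =>
    simp only [pvAdjChain, ih x, List.isChain_cons_cons]
    by_cases h : x = t <;> simp [h, eq_comm]

lemma pvAdjAny_not_chain {α : Type} [DecidableEq α] (l : List α) :
    pvAdjAny l = !decide (List.IsChain (· ≠ ·) l) := by
  cases l with
  | nil => simp [pvAdjAny]
  | cons x xs => simpa [pvAdjAny] using pvAdjChain_not_chain x xs

lemma pvAdjAny_reverse {α : Type} [DecidableEq α] (l : List α) :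
    pvAdjAny l.reverse = pvAdjAny l := by
  simp only [pvAdjAny_not_chain, List.isChain_reverse]
  congr 1
  simp only [decide_eq_decide]
  constructor <;> exact fun h => h.imp (fun _ _ hne => Ne.symm hne)

lemma pvAdjChain_map {α β : Type} [DecidableEq α] [DecidableEq β] (f : α → β) (t : α)
    (l : List α) (hf : ∀ a b, a ∈ t :: l → b ∈ t :: l → f a = f b → a = b) :
    pvAdjChain (f t) (l.map f) = pvAdjChain t l := by
  induction l generalizing t with
  | nil => rfl
  | cons x xs ih =>
    simp only [List.map_cons, pvAdjChain]
    have h1 : decide (f x = f t) = decide (x = t) := by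
      by_cases h : x = t
      · simp [h]
      · simp [h]
        intro hfe
        exact h (hf x t (by simp) (by simp) hfe)
    rw [h1, ih x (fun a b ha hb => hf a b (by simp at ha ⊢; tauto) (by simp at hb ⊢; tauto))]

lemma pvAdjAny_map {α β : Type} [DecidableEq α] [DecidableEq β] (f : α → β)
    (l : List α) (hf : ∀ a b, a ∈ l → b ∈ l → f a = f b → a = b) :
    pvAdjAny (l.map f) = pvAdjAny l := by
  cases l with
  | nil => rfl
  | cons x xs => exact pvAdjChain_map f x xs hf

lemma pvDigitChar_inj (a b : Nat) (ha : a < 10) (hb : b < 10) :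
    Nat.digitChar a = Nat.digitChar b → a = b := by
  interval_cases a <;> interval_cases b <;> simp [Nat.digitChar]

-- toDigitsCore with sufficient fuel produces the reversed digit characters
lemma pvToDigitsCore_eq (f : Nat) : ∀ (m : Nat) (acc : List Char), 0 < m → m < f →
    Nat.toDigitsCore 10 f m acc = ((Nat.digits 10 m).map Nat.digitChar).reverse ++ acc := by
  induction f with
  | zero => intro m acc h1 h2; omega
  | succ f ih =>
    intro m acc h1 h2
    rw [Nat.toDigitsCore]
    rw [Nat.digits_def' (by norm_num) h1]
    simp only [List.map_cons, List.reverse_cons]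
    by_cases h : m / 10 = 0
    · simp [h, Nat.digits_zero]
    · simp only [h, if_false]
      rw [ih (m / 10) (Nat.digitChar (m % 10) :: acc) (Nat.pos_of_ne_zero h)
        (by have := Nat.div_lt_self h1 (show 1 < 10 by norm_num); omega)]
      simp

lemma pvToDigits_eq (m : Nat) (h : 0 < m) :
    Nat.toDigits 10 m = ((Nat.digits 10 m).map Nat.digitChar).reverse := by
  rw [Nat.toDigits, pvToDigitsCore_eq (m + 1) m [] h (by omega)]
  simp

lemma pvMain (m : Nat) : pvALoop (Nat.toDigits 10 m) [] = pvBLoop (m % 10) (m / 10) := by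
  rw [pvALoop_eq_adjAny, pvBLoop_eq_chain]
  by_cases h : m = 0
  · subst h; rfl
  · have hpos : 0 < m := Nat.pos_of_ne_zero h
    rw [pvToDigits_eq m hpos, pvAdjAny_reverse,
      pvAdjAny_map Nat.digitChar _ (fun a b ha hb => pvDigitChar_inj a b
        (Nat.digits_lt_base (by norm_num) ha) (Nat.digits_lt_base (by norm_num) hb))]
    rw [Nat.digits_def' (show 1 < 10 by norm_num) hpos]
    rfl

-- ===== VERDICT (by name: the statement is the Claim_ definition above) =====
theorem hasconsecutivedigits_spec : Claim_equal_hasconsecutivedigits := by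
  intro n _
  unfold Spec_hasconsecutivedigits hasconsecutivedigits hasconsecutivedigits_alt
  simp only [PySem.Int.toChars]
  rw [if_neg (by simp), Int.toNat_natCast]
  exact pvMain n.natAbs
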